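-- pv_equiv track=rewrite | github.com/dvergarap13/ST0245-032 | laboratorios/lab01/ejercicioEnLinea/recursion2.py | groupsum5
-- ===== SOURCE A (Python) =====
-- def groupsum5(start,nums,target):
--     if start>=len(nums):
--         return target==0
--     if nums[start]%5==0:
--         if start<=len(nums) and nums[start+1]==1:
--             return groupsum5(start+2,nums,target-nums[start])
--         return groupsum5(start + 1, nums, target - nums[start])
--     return groupsum5(start+1,nums,target-nums[start]) or groupsum5(start+1,nums,target)
-- ===== SOURCE B (Python) =====
-- def groupsum5(start, nums, target):
--     # Iterative one-pass: walk the positions once, maintaining the SET of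
--     # achievable sums (multiples of 5 are mandatory; a 1 right after one is
--     # skipped); answer is membership of target in that set.
--     n = len(nums)
--     sums = {0}
--     i = start
--     while i < n:
--         v = nums[i]
--         if v % 5 == 0:
--             sums = {s + v for s in sums}
--             if i + 1 < n and nums[i + 1] == 1:
--                 i += 2
--             else:
--                 i += 1
--         else:
--             sums |= {s + v for s in sums}
--             i += 1
--     return target in sums
-- ===== Notes on version B (the rewrite author's own statement) =====
-- stated objective: alternative
-- what changed: replaces A's exponential branching recursion with a single iterative pass over the positions that maintains the deduplicated set of achievable sums and tests target membership at the end
import Mathlib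
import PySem

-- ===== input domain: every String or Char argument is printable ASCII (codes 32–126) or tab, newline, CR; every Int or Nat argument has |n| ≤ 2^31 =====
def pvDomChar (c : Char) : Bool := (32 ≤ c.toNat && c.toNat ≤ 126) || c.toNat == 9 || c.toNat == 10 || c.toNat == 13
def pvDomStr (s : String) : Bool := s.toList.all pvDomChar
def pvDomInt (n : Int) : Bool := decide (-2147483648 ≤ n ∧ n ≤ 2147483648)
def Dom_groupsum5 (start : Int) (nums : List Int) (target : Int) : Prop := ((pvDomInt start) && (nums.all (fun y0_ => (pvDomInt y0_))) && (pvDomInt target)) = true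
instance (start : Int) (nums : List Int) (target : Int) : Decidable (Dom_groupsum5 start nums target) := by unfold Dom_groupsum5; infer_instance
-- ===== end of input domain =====

-- B replaces A's exponential branching recursion by one iterative pass that maintains
-- the set of achievable sums; equivalence of the RETURN value is proved on Pre_.

-- ===== PORT A =====
def groupsum5 (start : Int) (nums : List Int) (target : Int) : Bool :=
  if _h : start ≥ (nums.length : Int) then target == 0
  else
    match PySem.List.pyGet? nums start with
    | none => false  -- IndexError in Python (excluded by Pre_)
    | some v =>
      if PySem.Int.mod v 5 == 0 then
        if start ≤ (nums.length : Int) then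
          match PySem.List.pyGet? nums (start + 1) with
          | none => false  -- IndexError in Python (excluded by Pre_)
          | some w =>
            if w == 1 then groupsum5 (start + 2) nums (target - v)
            else groupsum5 (start + 1) nums (target - v)
        else groupsum5 (start + 1) nums (target - v)
      else groupsum5 (start + 1) nums (target - v) || groupsum5 (start + 1) nums target
termination_by ((nums.length : Int) - start).toNat
decreasing_by all_goals (simp only [ge_iff_le, not_le] at _h; omega)

-- ===== PORT B =====
def groupsum5AltLoop (nums : List Int) (i : Int) (sums : PySem.Set Int) : PySem.Set Int :=
  if _h : i < (nums.length : Int) then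
    match PySem.List.pyGet? nums i with
    | none => sums  -- IndexError in Python (excluded by Pre_)
    | some v =>
      if PySem.Int.mod v 5 == 0 then
        let sums' := PySem.Set.ofList (sums.map (· + v))
        if i + 1 < (nums.length : Int) ∧ PySem.List.pyGet? nums (i + 1) = some 1 then
          groupsum5AltLoop nums (i + 2) sums'
        else groupsum5AltLoop nums (i + 1) sums'
      else groupsum5AltLoop nums (i + 1) (PySem.Set.union sums (sums.map (· + v)))
  else sums
termination_by ((nums.length : Int) - i).toNat
decreasing_by all_goals omega

def groupsum5_alt (start : Int) (nums : List Int) (target : Int) : Bool :=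
  PySem.Set.contains (groupsum5AltLoop nums start (PySem.Set.ofList [0])) target

-- ===== PRECONDITION & SPEC =====
-- Pre_ excludes exactly the inputs where A raises IndexError: start below -len(nums)
-- (first access out of range), or the last element a multiple of 5 with start inside the
-- list (the walk then reaches the last index and reads nums[start+1] past the end).
def Pre_groupsum5 (start : Int) (nums : List Int) (target : Int) : Prop :=
  start < (nums.length : Int) →
    (-(nums.length : Int) ≤ start ∧ PySem.Int.mod (nums.getLast?.getD 1) 5 ≠ 0)
instance (start : Int) (nums : List Int) (target : Int) : Decidable (Pre_groupsum5 start nums target) := by unfold Pre_groupsum5; infer_instance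

def pvWitness_groupsum5 : Int × List Int × Int := (0, [3, 5, 1, 2], 8)

def Spec_groupsum5 (start : Int) (nums : List Int) (target : Int) (out : Bool) : Prop := out = groupsum5_alt start nums target
instance (start : Int) (nums : List Int) (target : Int) (out : Bool) : Decidable (Spec_groupsum5 start nums target out) := by unfold Spec_groupsum5; infer_instance

-- ===== CLAIM (what is proved, stated in full; the proofs are below) =====
def Claim_equal_groupsum5 : Prop := ∀ (start : Int) (nums : List Int) (target : Int), Dom_groupsum5 start nums target → Pre_groupsum5 start nums target → Spec_groupsum5 start nums target (groupsum5 start nums target)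

-- ===== LEMMAS AND PROOFS =====

-- the set of sums A's recursion can reach from position i (as a list of candidates)
def Ach (nums : List Int) (i : Int) : List Int :=
  if _h : i ≥ (nums.length : Int) then [0]
  else
    match PySem.List.pyGet? nums i with
    | none => []
    | some v =>
      if PySem.Int.mod v 5 == 0 then
        if i + 1 < (nums.length : Int) ∧ PySem.List.pyGet? nums (i + 1) = some 1 then
          (Ach nums (i + 2)).map (· + v)
        else (Ach nums (i + 1)).map (· + v)
      else (Ach nums (i + 1)).map (· + v) ++ Ach nums (i + 1)
termination_by ((nums.length : Int) - i).toNat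
decreasing_by all_goals (simp only [ge_iff_le, not_le] at *; omega)

theorem mem_map_add_iff (l : List Int) (v t : Int) : t ∈ l.map (· + v) ↔ t - v ∈ l := by
  simp only [List.mem_map]
  constructor
  · rintro ⟨a, ha, rfl⟩; simpa using ha
  · intro h; exact ⟨t - v, h, by ring⟩

theorem pyGet?_some_of_range (nums : List Int) (i : Int)
    (h1 : -(nums.length : Int) ≤ i) (h2 : i < (nums.length : Int)) :
    ∃ v, PySem.List.pyGet? nums i = some v := by
  cases hv : PySem.List.pyGet? nums i with
  | none =>
    rw [PySem.List.pyGet?_eq_none_iff] at hv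
    exact absurd (by constructor <;> omega : PySem.Raise.InRange nums.length i) hv
  | some v => exact ⟨v, rfl⟩

theorem groupsum5_mem_ach (nums : List Int)
    (Hbad : ∀ v, PySem.List.pyGet? nums ((nums.length : Int) - 1) = some v →
      PySem.Int.mod v 5 ≠ 0) :
    ∀ (k : Nat) (i t : Int), ((nums.length : Int) - i).toNat ≤ k →
      -(nums.length : Int) ≤ i →
      (groupsum5 i nums t = true ↔ t ∈ Ach nums i) := by
  intro k
  induction k with
  | zero =>
    intro i t hk hge
    have hni : (nums.length : Int) ≤ i := by omega
    rw [groupsum5.eq_def, Ach.eq_def]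
    simp [ge_iff_le, hni]
  | succ k ih =>
    intro i t hk hge
    by_cases hni : (nums.length : Int) ≤ i
    · rw [groupsum5.eq_def, Ach.eq_def]
      simp [ge_iff_le, hni]
    · push_neg at hni
      obtain ⟨v, hv⟩ := pyGet?_some_of_range nums i hge hni
      rw [groupsum5.eq_def, Ach.eq_def]
      simp only [ge_iff_le, hni, dite_false, dif_neg (not_le.mpr hni), hv]
      by_cases hm : PySem.Int.mod v 5 = 0
      · have hlt : i < (nums.length : Int) - 1 := by
          rcases lt_or_eq_of_le (by omega : i ≤ (nums.length : Int) - 1) with h | h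
          · exact h
          · exact absurd hm (Hbad v (h ▸ hv))
        obtain ⟨w, hw⟩ := pyGet?_some_of_range nums (i + 1) (by omega) (by omega)
        have hle : i ≤ (nums.length : Int) := by omega
        simp only [hm, beq_self_eq_true, if_true, hle, if_pos hle, hw]
        by_cases hw1 : w = 1
        · subst hw1
          simp only [beq_self_eq_true, if_true, hw, and_true]
          rw [if_pos (show i + 1 < (nums.length : Int) by omega)]
          rw [ih (i + 2) (t - v) (by omega) (by omega), mem_map_add_iff]
        · have hcond : ¬ (i + 1 < (nums.length : Int) ∧
              PySem.List.pyGet? nums (i + 1) = some 1) := by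
            rintro ⟨-, hc⟩; rw [hw] at hc; exact hw1 (Option.some.inj hc)
          simp only [beq_iff_eq, hw1, if_false]
          rw [if_neg (show ¬(i + 1 < (nums.length : Int) ∧ some w = some 1) by
            rintro ⟨-, h⟩; exact hw1 (Option.some.inj h))]
          rw [ih (i + 1) (t - v) (by omega) (by omega), mem_map_add_iff]
      · simp only [beq_iff_eq, hm, if_false]
        rw [Bool.or_eq_true, ih (i + 1) (t - v) (by omega) (by omega),
          ih (i + 1) t (by omega) (by omega), List.mem_append, mem_map_add_iff]

theorem altLoop_mem (nums : List Int)
    (Hbad : ∀ v, PySem.List.pyGet? nums ((nums.length : Int) - 1) = some v →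
      PySem.Int.mod v 5 ≠ 0) :
    ∀ (k : Nat) (i : Int) (S : PySem.Set Int) (t : Int),
      ((nums.length : Int) - i).toNat ≤ k →
      -(nums.length : Int) ≤ i →
      (t ∈ groupsum5AltLoop nums i S ↔ ∃ s ∈ S, ∃ a ∈ Ach nums i, t = s + a) := by
  intro k
  induction k with
  | zero =>
    intro i S t hk hge
    have hni : (nums.length : Int) ≤ i := by
      omega
    rw [groupsum5AltLoop.eq_def, Ach.eq_def]
    simp [ge_iff_le, hni, not_lt.mpr hni]
  | succ k ih =>
    intro i S t hk hge
    by_cases hni : (nums.length : Int) ≤ i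
    · rw [groupsum5AltLoop.eq_def, Ach.eq_def]
      simp [ge_iff_le, hni, not_lt.mpr hni]
    · push_neg at hni
      obtain ⟨v, hv⟩ := pyGet?_some_of_range nums i hge hni
      rw [groupsum5AltLoop.eq_def, Ach.eq_def]
      simp only [hni, dite_true, ge_iff_le, dif_neg (not_le.mpr hni), hv]
      by_cases hm : PySem.Int.mod v 5 = 0
      · simp only [hm, beq_self_eq_true, if_true]
        by_cases hcond : i + 1 < (nums.length : Int) ∧
            PySem.List.pyGet? nums (i + 1) = some 1
        · simp only [if_pos hcond]
          rw [ih (i + 2) _ t (by omega) (by omega)]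
          constructor
          · rintro ⟨s, hs, a, ha, rfl⟩
            rw [PySem.Set.mem_ofList, List.mem_map] at hs
            obtain ⟨s0, hs0, rfl⟩ := hs
            exact ⟨s0, hs0, a + v, List.mem_map.mpr ⟨a, ha, rfl⟩, by ring⟩
          · rintro ⟨s, hs, a, ha, rfl⟩
            rw [List.mem_map] at ha
            obtain ⟨a0, ha0, rfl⟩ := ha
            exact ⟨s + v, (by rw [PySem.Set.mem_ofList]; exact List.mem_map.mpr ⟨s, hs, rfl⟩),
              a0, ha0, by ring⟩
        · simp only [if_neg hcond]
          rw [ih (i + 1) _ t (by omega) (by omega)]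
          constructor
          · rintro ⟨s, hs, a, ha, rfl⟩
            rw [PySem.Set.mem_ofList, List.mem_map] at hs
            obtain ⟨s0, hs0, rfl⟩ := hs
            exact ⟨s0, hs0, a + v, List.mem_map.mpr ⟨a, ha, rfl⟩, by ring⟩
          · rintro ⟨s, hs, a, ha, rfl⟩
            rw [List.mem_map] at ha
            obtain ⟨a0, ha0, rfl⟩ := ha
            exact ⟨s + v, (by rw [PySem.Set.mem_ofList]; exact List.mem_map.mpr ⟨s, hs, rfl⟩),
              a0, ha0, by ring⟩
      · simp only [beq_iff_eq, hm, if_false]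
        rw [ih (i + 1) _ t (by omega) (by omega)]
        constructor
        · rintro ⟨s, hs, a, ha, rfl⟩
          rw [PySem.Set.mem_union] at hs
          rcases hs with hs | hs
          · exact ⟨s, hs, a, List.mem_append.mpr (Or.inr ha), rfl⟩
          · rw [List.mem_map] at hs
            obtain ⟨s0, hs0, rfl⟩ := hs
            exact ⟨s0, hs0, a + v, List.mem_append.mpr
              (Or.inl (List.mem_map.mpr ⟨a, ha, rfl⟩)), by ring⟩
        · rintro ⟨s, hs, a, ha, rfl⟩
          rcases List.mem_append.mp ha with ha | ha
          · rw [List.mem_map] at ha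
            obtain ⟨a0, ha0, rfl⟩ := ha
            exact ⟨s + v, (by rw [PySem.Set.mem_union]; exact Or.inr (List.mem_map.mpr ⟨s, hs, rfl⟩)), a0, ha0, by ring⟩
          · exact ⟨s, (by rw [PySem.Set.mem_union]; exact Or.inl hs), a, ha, rfl⟩

-- ===== VERDICT (by name: the statement is the Claim_ definition above) =====
theorem groupsum5_spec : Claim_equal_groupsum5 := by
  intro start nums target _ hPre
  unfold Spec_groupsum5 groupsum5_alt
  by_cases hlt : start < (nums.length : Int)
  · obtain ⟨hge, hlast⟩ := hPre hlt
    have hn : 0 < nums.length := by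
      by_contra h
      have : nums.length = 0 := by omega
      rw [this] at hlt hge
      omega
    have Hbad : ∀ v, PySem.List.pyGet? nums ((nums.length : Int) - 1) = some v →
        PySem.Int.mod v 5 ≠ 0 := by
      intro v hv hm
      rw [show ((nums.length : Int) - 1) = ((nums.length - 1 : Nat) : Int) by omega,
        PySem.List.pyGet?_natCast, ← List.getLast?_eq_getElem?] at hv
      rw [hv] at hlast
      exact hlast (by simpa using hm)
    have hA := groupsum5_mem_ach nums Hbad ((nums.length : Int) - start).toNat start
      target le_rfl hge
    have hB := altLoop_mem nums Hbad ((nums.length : Int) - start).toNat start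
      (PySem.Set.ofList [0]) target le_rfl hge
    have hiff : groupsum5 start nums target = true ↔
        PySem.Set.contains (groupsum5AltLoop nums start (PySem.Set.ofList [0]))
          target = true := by
      rw [hA, PySem.Set.contains_iff, hB]
      constructor
      · intro h; exact ⟨0, by simp [PySem.Set.mem_ofList], target, h, by ring⟩
      · rintro ⟨s, hs, a, ha, rfl⟩
        have : s = 0 := by simpa [PySem.Set.mem_ofList] using hs
        simpa [this] using ha
    rcases h1 : groupsum5 start nums target <;>
      rcases h2 : PySem.Set.contains (groupsum5AltLoop nums start
        (PySem.Set.ofList [0])) target <;>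
      simp_all
  · have h1 : (nums.length : Int) ≤ start := not_lt.mp hlt
    rw [groupsum5.eq_def, groupsum5AltLoop.eq_def]
    rw [dif_pos (show start ≥ (nums.length : Int) from h1), dif_neg (not_lt.mpr h1)]
    by_cases ht : target = 0
    · subst ht; decide
    · have h2 : (target == 0) = false := by simp [ht]
      have h3 : ¬ (PySem.Set.contains (PySem.Set.ofList [0]) target = true) := by
        rw [PySem.Set.contains_iff, PySem.Set.mem_ofList]
        simp [ht]
      rw [h2]
      exact (Bool.eq_false_iff.mpr h3).symm
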